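-- pv_equiv track=rewrite | github.com/HwangJae-won/Coding_Test | 2022~2024/프로그래머스/unrated/135808. 과일 장수/과일 장수.py | solution
-- ===== SOURCE A (Python) =====
-- def solution(k, m, score):
--     answer = 0
--     score.sort(reverse = True)
--     li = [score[i:i+m] for i in range(0, len(score), m)]
--
--     for i in range(len(li)):
--         if len(li[i]) == m:
--             p= min(li[i])
--             answer+= p*m
--     return answer
-- ===== SOURCE B (Python) =====
-- def solution(k, m, score):
--     # Histogram approach: count each score, walk distinct scores from high to low,
--     # and count how many full-box boundaries (positions that are multiples of m in
--     # the descending order) fall inside each value's block of positions; each such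
--     # boundary's value is that box's minimum.  No sorting of the full list, no
--     # sublists, no per-group min.  NOTE: A sorts `score` in place; B leaves it alone.
--     counts = {}
--     for v in score:
--         counts[v] = counts.get(v, 0) + 1
--     if len(score) // m <= 0:
--         return 0
--     answer = 0
--     seen = 0
--     for v in sorted(counts, reverse=True):
--         nxt = seen + counts[v]
--         answer += v * (nxt // m - seen // m)
--         seen = nxt
--     return answer * m
-- ===== Notes on version B (the rewrite author's own statement) =====
-- stated objective: alternative
-- what changed: B replaces A's sort-the-whole-list + slice-into-m-groups + min-per-group by a value histogram: it counts occurrences in a dict, walks the distinct values from high to low keeping a running prefix count, and for each value adds value * (number of box boundaries, i.e. multiples of m, falling inside its block of positions); no full sort, no sublists, no min calls.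
import Mathlib
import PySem

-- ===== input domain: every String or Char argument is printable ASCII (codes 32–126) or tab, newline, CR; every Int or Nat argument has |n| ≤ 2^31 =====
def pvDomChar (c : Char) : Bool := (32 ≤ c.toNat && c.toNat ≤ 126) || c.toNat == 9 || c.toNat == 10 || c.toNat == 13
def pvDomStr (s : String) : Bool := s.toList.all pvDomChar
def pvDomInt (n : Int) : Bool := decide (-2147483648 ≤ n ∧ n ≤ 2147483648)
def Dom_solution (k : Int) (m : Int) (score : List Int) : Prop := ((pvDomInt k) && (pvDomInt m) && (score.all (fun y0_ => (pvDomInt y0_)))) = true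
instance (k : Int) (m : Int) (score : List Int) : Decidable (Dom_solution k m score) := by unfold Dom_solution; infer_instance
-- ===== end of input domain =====

-- B replaces A's sort + m-sized slices + per-group min by a value histogram (dict of counts)
-- walked from the highest distinct value down, adding value * (box boundaries inside its block)
-- (objective: alternative). A sorts `score` in place; B does not mutate it — the theorems are
-- about the return value only.


-- ===== PORT A =====
def solution (k : Int) (m : Int) (score : List Int) : Int :=
  let answer : Int := 0
  let s := PySem.List.sorted score (fun x => x) true
  let li : List (List Int) :=
    (PySem.List.pyRange 0 (s.length : Int) m).map
      (fun i => PySem.List.slice s (some i) (some (i + m)))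
  (PySem.List.pyRange 0 (li.length : Int) 1).foldl
    (fun ans i =>
      let c := PySem.List.pyGetD li i []
      if (c.length : Int) = m then
        -- min(li[i]); the `.getD 0` default is unreachable: c.length = m ≠ 0 under Pre_
        ans + ((PySem.List.min? c (fun x => x)).getD 0) * m
      else ans) answer

-- ===== PORT B =====
def solution_alt (k : Int) (m : Int) (score : List Int) : Int :=
  let counts : PySem.Dict Int Int :=
    score.foldl (fun d v => d.insert v (d.getD v 0 + 1)) PySem.Dict.empty
  if PySem.Int.floordiv (score.length : Int) m ≤ 0 then 0
  else
    let keys := PySem.List.sorted (PySem.Dict.keys counts) (fun x => x) true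
    let r := keys.foldl (fun (p : Int × Int) v =>
        let nxt := p.2 + counts.getD v 0
        (p.1 + v * (PySem.Int.floordiv nxt m - PySem.Int.floordiv p.2 m), nxt)) ((0 : Int), (0 : Int))
    r.1 * m

-- ===== PRECONDITION & SPEC =====
-- Pre_ excludes exactly m = 0, where A raises ValueError (range() step 0) and B raises ZeroDivisionError.
def Pre_solution (k : Int) (m : Int) (score : List Int) : Prop := m ≠ 0
instance (k : Int) (m : Int) (score : List Int) : Decidable (Pre_solution k m score) := by unfold Pre_solution; infer_instance
def pvWitness_solution : Int × Int × List Int := (4, 3, [1, 2, 3, 1, 2, 3, 1])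

def Spec_solution (k : Int) (m : Int) (score : List Int) (out : Int) : Prop := out = solution_alt k m score
instance (k : Int) (m : Int) (score : List Int) (out : Int) : Decidable (Spec_solution k m score out) := by unfold Spec_solution; infer_instance

-- ===== CLAIM (what is proved, stated in full; the proofs are below) =====
def Claim_equal_solution : Prop := ∀ (k : Int) (m : Int) (score : List Int), Dom_solution k m score → Pre_solution k m score → Spec_solution k m score (solution k m score)

-- ===== LEMMAS AND PROOFS =====

-- the common midpoint: m * (sum of the minima of the n/m full groups of the descending sort)
def pvFormula (M : Nat) (s : List Int) : Int :=
  ((List.range (s.length / M)).map (fun j => s.getD (M * j + M - 1) 0)).sum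

-- range(a, b, s) with b ≥ a = 0 and negative step is empty
lemma pyRange_neg_step_nil (b s : Int) (hb : 0 ≤ b) (hs : s < 0) : PySem.List.pyRange 0 b s = [] := by
  simp only [PySem.List.pyRange]
  rw [if_neg (by omega), if_neg (by omega)]
  simp
  intro h
  omega

-- the minimum of a nonempty descending list is its last element
lemma foldl_min_getLast (t : List Int) (x : Int)
    (h : (x :: t).Pairwise (fun a b => b ≤ a)) :
    t.foldl min x = (x :: t).getLast (by simp) := by
  induction t generalizing x with
  | nil => simp
  | cons y t ih =>
    have hyx : y ≤ x := (List.pairwise_cons.1 h).1 y (by simp)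
    have ht : (y :: t).Pairwise (fun a b => b ≤ a) := (List.pairwise_cons.1 h).2
    have : List.foldl min x (y :: t) = List.foldl min y t := by
      simp [List.foldl, min_eq_right hyx]
    rw [this, ih y ht]
    simp [List.getLast]

-- floor division of a nonnegative by a negative is nonpositive
lemma floordiv_nonpos_of_neg (n m : Int) (hn : 0 ≤ n) (hm : m < 0) :
    PySem.Int.floordiv n m ≤ 0 := by
  by_contra h
  have h' := not_le.mp h
  have hmod := PySem.Int.mod_neg_bounds (a := n) (b := m) hm
  have heq := PySem.Int.floordiv_mul_add_mod n m
  nlinarith [heq, hmod.1, hmod.2, h']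

-- the min of a full descending chunk is its last element
lemma min_chunk (s : List Int) (hpw : s.Pairwise (fun a b => b ≤ a)) (p M : Nat) (hM : 0 < M)
    (hle : p + M ≤ s.length) :
    (PySem.List.min? ((s.drop p).take M) (fun x => x)).getD 0 = s.getD (p + M - 1) 0 := by
  have hlen : ((s.drop p).take M).length = M := by
    simp [List.length_take, List.length_drop]; omega
  have hpwc : ((s.drop p).take M).Pairwise (fun a b => b ≤ a) :=
    hpw.sublist ((List.take_sublist _ _).trans (List.drop_sublist _ _))
  cases hxt : (s.drop p).take M with
  | nil => rw [hxt] at hlen; simp at hlen; omega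
  | cons x t =>
    rw [hxt] at hpwc
    rw [PySem.List.min?_id_cons, Option.getD_some, foldl_min_getLast t x hpwc]
    have hne : (x :: t) ≠ [] := by simp
    rw [List.getLast_eq_getElem]
    have hlen2 : (x :: t).length = M := hxt ▸ hlen
    have hM1 : M - 1 < (x :: t).length := by omega
    have : (x :: t)[(x :: t).length - 1] = s[p + M - 1]'(by omega) := by
      simp only [← hxt]
      rw [List.getElem_take, List.getElem_drop]
      congr 1
      omega
    rw [this, List.getD_eq_getElem]

-- A with positive m computes the formula
lemma solution_eq_formula (k : Int) (M : Nat) (score : List Int) (hM : 0 < M) :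
    solution k (M : Int) score = pvFormula M (PySem.List.sorted score (fun x => x) true) * (M : Int) := by
  simp only [solution, pvFormula]
  set s := PySem.List.sorted score (fun x => x) true with hs
  have hpw : s.Pairwise (fun a b => b ≤ a) := PySem.List.sorted_pairwise_rev score (fun x => x)
  set N := s.length with hN
  set g := N / M with hgdef
  set T := (N + M - 1) / M with hTdef
  have hdm : M * g + N % M = N := Nat.div_add_mod N M
  have hmod : N % M < M := Nat.mod_lt N hM
  have hMg : M * g ≤ N := by omega
  have hNlt : N < M * (g + 1) := by rw [Nat.mul_succ]; omega
  have hgT : g ≤ T := Nat.div_le_div_right (by omega)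
  -- the range of chunk starts
  have hR : PySem.List.pyRange 0 (N : Int) (M : Int) =
      (List.range T).map (fun j => ((M * j : Nat) : Int)) := by
    rw [PySem.List.pyRange_of_pos 0 (N : Int) (by exact_mod_cast hM)]
    have h1 : (if (0:Int) < (N:Int) then (((N:Int) - 0 + (M:Int) - 1) / (M:Int)).toNat else 0) = T := by
      split_ifs with h
      · have e : ((N:Int) - 0 + (M:Int) - 1) = ((N + M - 1 : Nat) : Int) := by omega
        rw [e, ← Int.natCast_ediv, Int.toNat_natCast]
      · have hN0 : N = 0 := by omega
        rw [hTdef, hN0]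
        exact (Nat.div_eq_of_lt (by omega)).symm
    rw [h1]
    refine List.map_congr_left ?_
    intro a _
    push_cast
    ring
  rw [hR, List.map_map]
  -- A's loop over indices of li is a fold over li
  rw [PySem.List.foldl_pyRange_zero_pyGetD'
      ((List.range T).map ((fun i => PySem.List.slice s (some i) (some (i + (M:Int)))) ∘ (fun j => ((M * j : Nat) : Int))))
      []
      (fun ans c => if ((c.length : Int) = (M:Int)) then ans + ((PySem.List.min? c (fun x => x)).getD 0) * (M:Int) else ans)
      0]
  rw [List.foldl_map]
  -- pointwise evaluation of the loop body
  have hpoint : ∀ (acc : Int), ∀ j ∈ List.range T,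
      (fun ans c => if ((c.length : Int) = (M:Int)) then ans + ((PySem.List.min? c (fun x => x)).getD 0) * (M:Int) else ans) acc
        (((fun i => PySem.List.slice s (some i) (some (i + (M:Int)))) ∘ (fun j => ((M * j : Nat) : Int))) j)
      = (fun ans j => ans + (if M * (j + 1) ≤ N then s.getD (M * j + M - 1) 0 * (M:Int) else 0)) acc j := by
    intro acc j _
    simp only [Function.comp]
    rw [PySem.List.slice_natCast_add s (M*j) M]
    have hlen : ((s.drop (M*j)).take M).length = min M (N - M*j) := by
      simp [hN]
    have hmul : M * (j + 1) = M * j + M := by ring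
    by_cases hfull : M * (j + 1) ≤ N
    · have hlenM : ((s.drop (M*j)).take M).length = M := by rw [hlen]; omega
      rw [if_pos (by rw [hlenM]), if_pos hfull,
          min_chunk s hpw (M*j) M hM (by omega)]
    · have hlenM : ((s.drop (M*j)).take M).length ≠ M := by rw [hlen]; omega
      rw [if_neg (by exact_mod_cast hlenM), if_neg hfull, add_zero]
  rw [PySem.List.foldl_congr_mem _ _ _ _ hpoint, PySem.List.foldl_add, zero_add]
  -- drop the partial-group tail of the range
  have hsplit : (List.map (fun j => if M * (j + 1) ≤ N then s.getD (M * j + M - 1) 0 * (M:Int) else 0) (List.range T)).sum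
      = (List.map (fun j => s.getD (M * j + M - 1) 0 * (M:Int)) (List.range g)).sum := by
    rw [show T = g + (T - g) by omega, List.range_add, List.map_append, List.sum_append]
    have h2 : (List.map (fun j => if M * (j + 1) ≤ N then s.getD (M * j + M - 1) 0 * (M:Int) else 0)
        (List.map (fun x => g + x) (List.range (T - g)))).sum = 0 := by
      apply List.sum_eq_zero
      intro x hx
      simp only [List.mem_map, List.mem_range] at hx
      obtain ⟨j, ⟨i, _, rfl⟩, rfl⟩ := hx
      rw [if_neg (not_le.mpr (lt_of_lt_of_le hNlt (Nat.mul_le_mul_left M (by omega))))]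
    rw [h2, add_zero]
    refine congrArg List.sum (List.map_congr_left ?_)
    intro j hj
    rw [List.mem_range] at hj
    have : M * (j + 1) ≤ N := by
      calc M * (j + 1) ≤ M * g := Nat.mul_le_mul_left M (by omega)
        _ ≤ N := hMg
    rw [if_pos this]
  rw [hsplit, List.sum_map_mul_right]

lemma count_flatMap_replicate (c : Int → Nat) (x : Int) :
    ∀ (L : List Int), L.Nodup →
      (L.flatMap (fun v => List.replicate (c v) v)).count x = if x ∈ L then c x else 0 := by
  intro L
  induction L with
  | nil => simp
  | cons v L ih =>
    intro hnd
    rw [List.flatMap_cons, List.count_append, List.count_replicate,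
        ih (List.nodup_cons.1 hnd).2]
    by_cases hxv : x = v
    · subst hxv
      simp [(List.nodup_cons.1 hnd).1]
    · simp [hxv]
      intro h; exact absurd h.symm hxv

lemma pairwise_flatMap_replicate (c : Int → Nat) :
    ∀ (L : List Int), L.Pairwise (fun a b => b < a) →
      (L.flatMap (fun v => List.replicate (c v) v)).Pairwise (fun a b => b ≤ a) := by
  intro L
  induction L with
  | nil => simp
  | cons v L ih =>
    intro hpw
    rw [List.flatMap_cons, List.pairwise_append]
    refine ⟨List.pairwise_replicate.2 (Or.inr le_rfl), ih (List.pairwise_cons.1 hpw).2, ?_⟩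
    intro a ha b hb
    obtain ⟨w, hw, hbw⟩ := List.mem_flatMap.1 hb
    rw [List.eq_of_mem_replicate ha, List.eq_of_mem_replicate hbw]
    exact le_of_lt ((List.pairwise_cons.1 hpw).1 w hw)

lemma sorted_eq_flatMap (score : List Int) :
    PySem.List.sorted score (fun x => x) true =
      (PySem.List.sorted (PySem.Set.ofList score) (fun x => x) true).flatMap
        (fun v => List.replicate (score.count v) v) := by
  set K := PySem.List.sorted (PySem.Set.ofList score) (fun x => x) true with hK
  have hKperm : K.Perm (PySem.Set.ofList score) := PySem.List.sorted_perm _ _ _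
  have hKnd : K.Nodup := hKperm.nodup_iff.2 (PySem.Set.nodup_ofList score)
  have hKpw : K.Pairwise (fun a b => b < a) := by
    have h1 : K.Pairwise (fun a b => b ≤ a) := PySem.List.sorted_pairwise_rev _ _
    have h2 : K.Pairwise (fun a b => a ≠ b) := hKnd
    exact (h1.and h2).imp (fun h => lt_of_le_of_ne h.1 (Ne.symm h.2))
  have hmemK : ∀ x, x ∈ K ↔ x ∈ score := by
    intro x
    rw [PySem.List.mem_sorted, PySem.Set.mem_ofList]
  have hperm : (K.flatMap (fun v => List.replicate (score.count v) v)).Perm score := by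
    rw [List.perm_iff_count]
    intro x
    rw [count_flatMap_replicate _ x K hKnd]
    by_cases hx : x ∈ K
    · rw [if_pos hx]
    · rw [if_neg hx, eq_comm, List.count_eq_zero]
      exact fun h => hx ((hmemK x).2 h)
  exact List.Perm.eq_of_pairwise (fun a b _ _ h1 h2 => le_antisymm h2 h1)
    (PySem.List.sorted_pairwise_rev _ _) (pairwise_flatMap_replicate _ K hKpw)
    ((PySem.List.sorted_perm _ _ _).trans hperm.symm)

lemma run_getD (M : Nat) (hM : 0 < M) (pre rest : List Int) (cv : Nat) (v : Int) (j : Nat)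
    (h1 : pre.length / M ≤ j) (h2 : j < (pre.length + cv) / M) :
    (pre ++ (List.replicate cv v ++ rest)).getD (M * j + M - 1) 0 = v := by
  have hlo : pre.length < (j + 1) * M := (Nat.div_lt_iff_lt_mul hM).1 (by omega)
  have hhi : (j + 1) * M ≤ pre.length + cv := (Nat.le_div_iff_mul_le hM).1 (by omega)
  have hmul : (j + 1) * M = M * j + M := by ring
  have hip : pre.length ≤ M * j + M - 1 := by omega
  have hlt : M * j + M - 1 < pre.length + cv := by omega
  rw [List.getD_append_right _ _ _ _ hip,
      List.getD_append _ _ _ _ (by rw [List.length_replicate]; omega),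
      List.getD_replicate _ (by omega)]

lemma range'_split (a b d : Nat) (h1 : a ≤ b) (h2 : b ≤ d) :
    List.range' a (d - a) = List.range' a (b - a) ++ List.range' b (d - b) := by
  conv_rhs => rw [show b = a + (b - a) by omega]
  rw [Nat.add_sub_cancel_left, List.range'_append_1]
  congr 1
  omega

lemma fold_runs (M : Nat) (hM : 0 < M) (c : Int → Nat) :
    ∀ (L pre : List Int) (acc : Int),
    (L.foldl (fun (p : Int × Int) v =>
        (p.1 + v * (PySem.Int.floordiv (p.2 + (c v : Int)) (M : Int) - PySem.Int.floordiv p.2 (M : Int)),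
         p.2 + (c v : Int)))
      (acc, (pre.length : Int))).1
    = acc + ((List.range' (pre.length / M) ((pre.length + (L.map c).sum) / M - pre.length / M)).map
        (fun j => (pre ++ L.flatMap (fun v => List.replicate (c v) v)).getD (M * j + M - 1) 0)).sum := by
  intro L
  induction L with
  | nil => intro pre acc; simp
  | cons v L ih =>
    intro pre acc
    rw [List.foldl_cons]
    have hpre' : ((pre ++ List.replicate (c v) v).length : Int) = (pre.length : Int) + (c v : Int) := by
      push_cast [List.length_append, List.length_replicate]; ring
    show (L.foldl (fun (p : Int × Int) v =>
        (p.1 + v * (PySem.Int.floordiv (p.2 + (c v : Int)) (M : Int) - PySem.Int.floordiv p.2 (M : Int)),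
         p.2 + (c v : Int)))
      (acc + v * (PySem.Int.floordiv ((pre.length : Int) + (c v : Int)) (M : Int) -
        PySem.Int.floordiv (pre.length : Int) (M : Int)),
       (pre.length : Int) + (c v : Int))).1 = _
    rw [← hpre', ih]
    simp only [List.length_append, List.length_replicate]
    rw [show ((pre.length + c v : Nat) : Int) = (pre.length : Int) + (c v : Int) by push_cast; ring,
        ← hpre']
    simp only [List.length_append, List.length_replicate]
    rw [PySem.Int.floordiv_natCast, PySem.Int.floordiv_natCast]
    rw [show (pre ++ List.replicate (c v) v) ++ L.flatMap (fun v => List.replicate (c v) v)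
        = pre ++ (List.replicate (c v) v ++ L.flatMap (fun v => List.replicate (c v) v)) from
        List.append_assoc ..]
    rw [show ((v :: L).map c).sum = c v + (L.map c).sum by simp]
    rw [show List.flatMap (fun v => List.replicate (c v) v) (v :: L)
        = List.replicate (c v) v ++ L.flatMap (fun v => List.replicate (c v) v) from List.flatMap_cons ..]
    have hab : pre.length / M ≤ (pre.length + c v) / M := Nat.div_le_div_right (by omega)
    have hbd : (pre.length + c v) / M ≤ (pre.length + (c v + (L.map c).sum)) / M :=
      Nat.div_le_div_right (by omega)
    rw [show pre.length + c v + (L.map c).sum = pre.length + (c v + (L.map c).sum) by omega]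
    rw [range'_split (pre.length / M) ((pre.length + c v) / M)
        ((pre.length + (c v + (L.map c).sum)) / M) hab hbd, List.map_append, List.sum_append]
    have hconst : (List.range' (pre.length / M) ((pre.length + c v) / M - pre.length / M)).map
        (fun j => (pre ++ (List.replicate (c v) v ++ L.flatMap (fun v => List.replicate (c v) v))).getD (M * j + M - 1) 0)
        = (List.range' (pre.length / M) ((pre.length + c v) / M - pre.length / M)).map (fun _ => v) := by
      refine List.map_congr_left ?_
      intro j hj
      rw [List.mem_range'_1] at hj
      exact run_getD M hM pre _ (c v) v j hj.1 (by omega)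
    rw [hconst, List.map_const', List.sum_replicate, List.length_range', nsmul_eq_mul,
        Nat.cast_sub hab]
    ring

-- B with positive m computes the formula
lemma solution_alt_eq_formula (k : Int) (M : Nat) (score : List Int) (hM : 0 < M) :
    solution_alt k (M : Int) score = pvFormula M (PySem.List.sorted score (fun x => x) true) * (M : Int) := by
  simp only [solution_alt]
  rw [PySem.Dict.foldl_insert_getD_add_one_eq_counter, PySem.Int.floordiv_natCast]
  by_cases hg : score.length / M = 0
  · rw [if_pos (by rw [hg]; norm_num)]
    rw [pvFormula, PySem.List.length_sorted, hg]
    simp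
  · rw [if_neg (not_le.mpr (by exact_mod_cast Nat.pos_of_ne_zero hg))]
    rw [PySem.Dict.keys_counter]
    simp only [PySem.Dict.getD_counter]
    have h := fold_runs M hM (fun v => score.count v)
      (PySem.List.sorted (PySem.Set.ofList score) (fun x => x) true) [] 0
    simp only [List.length_nil, Nat.zero_div, Nat.cast_zero, zero_add, tsub_zero,
      List.nil_append] at h
    rw [← sorted_eq_flatMap score] at h
    have hlen : ((PySem.List.sorted (PySem.Set.ofList score) (fun x => x) true).map
        (fun v => score.count v)).sum = (PySem.List.sorted score (fun x => x) true).length := by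
      conv_rhs => rw [sorted_eq_flatMap score]
      rw [List.length_flatMap]
      simp
    rw [hlen] at h
    rw [h]
    simp only [pvFormula, List.range_eq_range']

theorem solution_spec_aux (k m : Int) (score : List Int) (hm : m ≠ 0) :
    solution k m score = solution_alt k m score := by
  rcases lt_or_gt_of_ne hm with hneg | hpos
  · -- m < 0 : both sides are 0
    have h1 : PySem.List.pyRange 0 (score.length : Int) m = [] :=
      pyRange_neg_step_nil _ _ (Int.natCast_nonneg _) hneg
    have hg := floordiv_nonpos_of_neg (score.length : Int) m (Int.natCast_nonneg _) hneg
    simp [solution, solution_alt, h1, hg]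
  · obtain ⟨M, rfl⟩ : ∃ M : Nat, m = (M : Int) := ⟨m.toNat, (Int.toNat_of_nonneg hpos.le).symm⟩
    have hM : 0 < M := by exact_mod_cast hpos
    rw [solution_eq_formula k M score hM, solution_alt_eq_formula k M score hM]

-- ===== VERDICT (by name: the statement is the Claim_ definition above) =====
theorem solution_spec : Claim_equal_solution := by
  intro k m score _ hpre
  exact solution_spec_aux k m score hpre
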